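-- pv_equiv track=rewrite | github.com/kai-subramanian/leetcode-interview-top-150 | 2516_take_left_right.py | takeCharacters
-- ===== SOURCE A (Python) =====
-- def takeCharacters(s, k) -> int:
--         ac=0
--         bc=0
--         cc=0
--         for i in s:
--             if i=='a':
--                 ac+=1
--             elif i=='b':
--                 bc+=1
--             elif i=='c':
--                 cc+=1
--         if ac<k or bc<k or cc<k:
--             return -1
--
--         l=0
--         r=0
--         n=len(s)
--         a=0
--         b=0
--         c=0
--         ans=n
--         while r<n:
--             if s[r]=='a':a+=1
--             if s[r]=='b':b+=1
--             if s[r]=='c':c+=1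
--             r+=1
--             while a>ac-k or b>bc-k or c>cc-k:
--                 if s[l]=='a':a-=1
--                 if s[l]=='b':b-=1
--                 if s[l]=='c':c-=1
--                 l+=1
--             ans=min(ans,n-(r-l)) # update the size of sliding window
--         return ans
-- ===== SOURCE B (Python) =====
-- def prefix_counts(s, ch):
--     # out[i] = number of occurrences of ch in s[:i]
--     out = [0]
--     run = 0
--     for c in s:
--         if c == ch:
--             run += 1
--         out.append(run)
--     return out
--
-- def takeCharacters(s, k) -> int:
--     n = len(s)
--     ta = s.count('a')
--     tb = s.count('b')
--     tc = s.count('c')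
--     if ta < k or tb < k or tc < k:
--         return -1
--     pa = prefix_counts(s, 'a')
--     pb = prefix_counts(s, 'b')
--     pc = prefix_counts(s, 'c')
--     best = n
--     for i in range(n + 1):
--         # binary-search the smallest right-take j in [0, n-i] such that
--         # taking i from the left and j from the right yields >= k of each char
--         lo, hi = 0, n - i
--         while lo < hi:
--             mid = (lo + hi) // 2
--             if (pa[i] + ta - pa[n - mid] >= k
--                     and pb[i] + tb - pb[n - mid] >= k
--                     and pc[i] + tc - pc[n - mid] >= k):
--                 hi = mid
--             else:
--                 lo = mid + 1
--         best = min(best, i + lo)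
--     return best
-- ===== Notes on version B (the rewrite author's own statement) =====
-- stated objective: alternative
-- what changed: Replaces A's single sliding-window pass with prefix-count tables plus, for each left-take length, a binary search for the smallest feasible right-take.
import Mathlib
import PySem

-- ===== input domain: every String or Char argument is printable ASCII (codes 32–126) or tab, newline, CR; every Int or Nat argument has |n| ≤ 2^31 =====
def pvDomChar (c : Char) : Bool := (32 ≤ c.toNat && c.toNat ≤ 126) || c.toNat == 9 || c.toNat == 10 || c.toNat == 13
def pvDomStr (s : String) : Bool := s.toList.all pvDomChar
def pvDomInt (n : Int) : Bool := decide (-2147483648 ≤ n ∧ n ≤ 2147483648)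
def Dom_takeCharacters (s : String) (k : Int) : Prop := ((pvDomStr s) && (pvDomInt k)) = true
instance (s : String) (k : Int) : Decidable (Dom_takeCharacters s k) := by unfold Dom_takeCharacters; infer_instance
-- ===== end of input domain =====

-- B replaces A's sliding window by prefix-count tables plus, for each left-take
-- length, a binary search for the smallest feasible right-take (objective: alternative).

-- ===== PORT A =====
-- first loop of A: count 'a'/'b'/'c' with the if/elif chain
def pvCountA (t : List Char) : Int × Int × Int :=
  t.foldl (fun st i =>
    if i = 'a' then (st.1 + 1, st.2.1, st.2.2)
    else if i = 'b' then (st.1, st.2.1 + 1, st.2.2)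
    else if i = 'c' then (st.1, st.2.1, st.2.2 + 1)
    else st) (0, 0, 0)

-- inner `while` of A; the list `win` holds the current window s[l:r] (front = s[l]),
-- so `s[l]` is the window's head.  The `[]` case is Python's IndexError; it is
-- unreachable as called (an empty window has a = b = c = 0 and A only runs the
-- loop when ac-k, bc-k, cc-k are all nonnegative).
def pvShrink (acmk bcmk ccmk : Int) (win : List Char) (a b c : Int) :
    List Char × Int × Int × Int :=
  if a > acmk ∨ b > bcmk ∨ c > ccmk then
    match win with
    | [] => ([], a, b, c)
    | x :: rest =>
      pvShrink acmk bcmk ccmk rest (if x = 'a' then a - 1 else a)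
        (if x = 'b' then b - 1 else b) (if x = 'c' then c - 1 else c)
  else (win, a, b, c)

-- outer `while r < n` of A; `rem` is s[r:], `win` is s[l:r]
def pvLoop (acmk bcmk ccmk n : Int) :
    List Char → List Char → Int → Int → Int → Int → Int
  | [], _, _, _, _, ans => ans
  | x :: rem, win, a, b, c, ans =>
    let a1 := if x = 'a' then a + 1 else a
    let b1 := if x = 'b' then b + 1 else b
    let c1 := if x = 'c' then c + 1 else c
    match pvShrink acmk bcmk ccmk (win ++ [x]) a1 b1 c1 with
    | (win', a', b', c') =>
      pvLoop acmk bcmk ccmk n rem win' a' b' c'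
        (min ans (n - (win'.length : Int)))

def takeCharacters (s : String) (k : Int) : Int :=
  let t := s.toList
  match pvCountA t with
  | (ac, bc, cc) =>
    if ac < k ∨ bc < k ∨ cc < k then -1
    else pvLoop (ac - k) (bc - k) (cc - k) (t.length : Int) t [] 0 0 0 (t.length : Int)

-- ===== PORT B =====
-- prefix_counts of Source B: out[i] = occurrences of ch in s[:i]
def pvPref (ch : Char) (t : List Char) : List Int :=
  (t.foldl (fun (st : List Int × Int) c =>
      let run := st.2 + (if c = ch then 1 else 0)
      (st.1 ++ [run], run)) ([0], 0)).1

-- the `while lo < hi` binary search of Source B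
def pvBS (ok : Nat → Bool) (lo hi : Nat) : Nat :=
  if h : lo < hi then
    let mid := (lo + hi) / 2
    if ok mid then pvBS ok lo mid else pvBS ok (mid + 1) hi
  else lo
termination_by hi - lo
decreasing_by all_goals omega

def takeCharacters_alt (s : String) (k : Int) : Int :=
  let t := s.toList
  let n := t.length
  let ta : Int := t.count 'a'
  let tb : Int := t.count 'b'
  let tc : Int := t.count 'c'
  if ta < k ∨ tb < k ∨ tc < k then -1
  else
    let pa := pvPref 'a' t
    let pb := pvPref 'b' t
    let pc := pvPref 'c' t
    -- pa[i], pa[n-mid]: indices are always in range, so `getD _ 0` is exact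
    let ok : Nat → Nat → Bool := fun i j =>
      decide (pa.getD i 0 + ta - pa.getD (n - j) 0 ≥ k) &&
      decide (pb.getD i 0 + tb - pb.getD (n - j) 0 ≥ k) &&
      decide (pc.getD i 0 + tc - pc.getD (n - j) 0 ≥ k)
    (List.range (n + 1)).foldl
      (fun (best : Int) (i : Nat) => min best ((i : Int) + (pvBS (ok i) 0 (n - i) : Int))) (n : Int)

-- ===== PRECONDITION & SPEC =====
def Spec_takeCharacters (s : String) (k : Int) (out : Int) : Prop := out = takeCharacters_alt s k
instance (s : String) (k : Int) (out : Int) : Decidable (Spec_takeCharacters s k out) := by unfold Spec_takeCharacters; infer_instance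

-- ===== CLAIM (what is proved, stated in full; the proofs are below) =====
def Claim_equal_takeCharacters : Prop := ∀ (s : String) (k : Int), Dom_takeCharacters s k → Spec_takeCharacters s k (takeCharacters s k)

-- ===== LEMMAS AND PROOFS =====

-- integer-valued count
def cnt (ch : Char) (w : List Char) : Int := (w.count ch : Int)

-- a window that may be KEPT: its a/b/c counts fit under the bounds ka kb kc
def okW (ka kb kc : Int) (w : List Char) : Bool :=
  decide (cnt 'a' w ≤ ka) && decide (cnt 'b' w ≤ kb) && decide (cnt 'c' w ≤ kc)

-- longest valid suffix
def lvs (ka kb kc : Int) (w : List Char) : List Char :=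
  if okW ka kb kc w then w
  else match w with
  | [] => []
  | _ :: rest => lvs ka kb kc rest

-- f r = length of the longest valid suffix of t.take r
def fR (ka kb kc : Int) (t : List Char) (r : Nat) : Nat :=
  (lvs ka kb kc (t.take r)).length

-- M = the longest valid window length
def Mx (ka kb kc : Int) (t : List Char) : Nat :=
  ((List.range (t.length + 1)).map (fR ka kb kc t)).foldl max 0

theorem cnt_mono {u v : List Char} (ch : Char) (h : u.Sublist v) : cnt ch u ≤ cnt ch v := by
  unfold cnt; exact_mod_cast h.count_le ch

theorem okW_mono {ka kb kc : Int} {u v : List Char} (h : u.Sublist v)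
    (hv : okW ka kb kc v = true) : okW ka kb kc u = true := by
  simp only [okW, Bool.and_eq_true, decide_eq_true_eq] at hv ⊢
  exact ⟨⟨le_trans (cnt_mono 'a' h) hv.1.1, le_trans (cnt_mono 'b' h) hv.1.2⟩,
    le_trans (cnt_mono 'c' h) hv.2⟩

theorem okW_nil {ka kb kc : Int} (ha : 0 ≤ ka) (hb : 0 ≤ kb) (hc : 0 ≤ kc) :
    okW ka kb kc [] = true := by
  simp [okW, cnt]; omega

theorem lvs_suffix (ka kb kc : Int) (w : List Char) : lvs ka kb kc w <:+ w := by
  induction w with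
  | nil => simp [lvs]
  | cons x rest ih =>
    unfold lvs
    split
    · exact List.suffix_refl _
    · exact ih.trans (List.suffix_cons x rest)

theorem lvs_ok {ka kb kc : Int} (ha : 0 ≤ ka) (hb : 0 ≤ kb) (hc : 0 ≤ kc)
    (w : List Char) : okW ka kb kc (lvs ka kb kc w) = true := by
  induction w with
  | nil => unfold lvs; split <;> simp_all [okW_nil ha hb hc]
  | cons x rest ih => unfold lvs; split <;> simp_all

theorem lvs_longest {ka kb kc : Int} (w u : List Char) (hu : u <:+ w)
    (hok : okW ka kb kc u = true) : u.length ≤ (lvs ka kb kc w).length := by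
  induction w with
  | nil => simp_all [List.suffix_nil]
  | cons x rest ih =>
    unfold lvs
    split
    · exact hu.length_le
    · rcases List.suffix_cons_iff.mp hu with h | h
      · subst h; simp_all
      · exact ih h

-- suffixes of a common list are totally ordered by length
theorem suffix_of_suffix_length_le {u v w : List Char} (h1 : u <:+ w) (h2 : v <:+ w)
    (h : u.length ≤ v.length) : u <:+ v := by
  rw [← List.reverse_prefix] at h1 h2 ⊢
  exact List.prefix_of_prefix_length_le h1 h2 (by simpa using h)

theorem suffix_append_right {u w : List Char} (x : Char) (h : u <:+ w) :
    u ++ [x] <:+ w ++ [x] := by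
  rcases h with ⟨p, hp⟩
  exact ⟨p, by rw [← List.append_assoc, hp]⟩

theorem suffix_append_singleton {u w : List Char} {x : Char} (h : u <:+ w ++ [x]) :
    u = [] ∨ ∃ v, v <:+ w ∧ u = v ++ [x] := by
  rcases List.eq_nil_or_concat u with rfl | ⟨v, y, rfl⟩
  · exact Or.inl rfl
  · right
    rcases h with ⟨p, hp⟩
    simp only [List.concat_eq_append] at hp ⊢
    rw [← List.append_assoc] at hp
    have h2 := congrArg List.reverse hp
    simp only [List.reverse_append, List.reverse_singleton, List.singleton_append,
      List.cons_append, List.cons.injEq] at h2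
    obtain ⟨rfl, h3⟩ := h2
    have h4 : p ++ v = w := by
      have := congrArg List.reverse h3
      simpa using this
    exact ⟨v, ⟨p, h4⟩, rfl⟩

theorem lvs_append_singleton {ka kb kc : Int} (ha : 0 ≤ ka) (hb : 0 ≤ kb) (hc : 0 ≤ kc)
    (w : List Char) (x : Char) :
    lvs ka kb kc (lvs ka kb kc w ++ [x]) = lvs ka kb kc (w ++ [x]) := by
  have hLs : lvs ka kb kc (lvs ka kb kc w ++ [x]) <:+ w ++ [x] :=
    (lvs_suffix ka kb kc _).trans (suffix_append_right x (lvs_suffix ka kb kc w))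
  have hRs := lvs_suffix ka kb kc (w ++ [x])
  have hokL := lvs_ok ha hb hc (lvs ka kb kc w ++ [x])
  have hokR := lvs_ok ha hb hc (w ++ [x])
  have h1 : (lvs ka kb kc (lvs ka kb kc w ++ [x])).length ≤
      (lvs ka kb kc (w ++ [x])).length :=
    lvs_longest _ _ hLs hokL
  have h2 : (lvs ka kb kc (w ++ [x])).length ≤
      (lvs ka kb kc (lvs ka kb kc w ++ [x])).length := by
    rcases suffix_append_singleton hRs with hnil | ⟨v, hv, he⟩
    · rw [hnil]; simp
    · have hokv : okW ka kb kc v = true :=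
        okW_mono (List.sublist_append_left v [x]) (he ▸ hokR)
      have hlen : v.length ≤ (lvs ka kb kc w).length := lvs_longest w v hv hokv
      have hsv : v <:+ lvs ka kb kc w :=
        suffix_of_suffix_length_le hv (lvs_suffix ka kb kc w) hlen
      exact he ▸ lvs_longest _ _ (suffix_append_right x hsv) (he ▸ hokR)
  exact (suffix_of_suffix_length_le hLs hRs h1).eq_of_length (le_antisymm h1 h2)

-- pvShrink computes the longest valid suffix (when fed the true counts)
theorem pvShrink_eq {ka kb kc : Int} (ha : 0 ≤ ka) (hb : 0 ≤ kb) (hc : 0 ≤ kc)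
    (w : List Char) :
    pvShrink ka kb kc w (cnt 'a' w) (cnt 'b' w) (cnt 'c' w) =
      (lvs ka kb kc w, cnt 'a' (lvs ka kb kc w), cnt 'b' (lvs ka kb kc w),
        cnt 'c' (lvs ka kb kc w)) := by
  induction w with
  | nil =>
    unfold pvShrink lvs
    have hc0 : ¬(cnt 'a' ([] : List Char) > ka ∨ cnt 'b' ([] : List Char) > kb ∨
        cnt 'c' ([] : List Char) > kc) := by
      simp [cnt]; omega
    rw [if_neg hc0, if_pos (okW_nil ha hb hc)]
  | cons x rest ih =>
    by_cases hok : okW ka kb kc (x :: rest) = true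
    · have hcond : ¬(cnt 'a' (x :: rest) > ka ∨ cnt 'b' (x :: rest) > kb ∨
          cnt 'c' (x :: rest) > kc) := by
        simp only [okW, Bool.and_eq_true, decide_eq_true_eq] at hok
        omega
      unfold pvShrink lvs
      rw [if_neg hcond, if_pos hok]
    · have hcond : cnt 'a' (x :: rest) > ka ∨ cnt 'b' (x :: rest) > kb ∨
          cnt 'c' (x :: rest) > kc := by
        simp only [okW, Bool.and_eq_true, decide_eq_true_eq] at hok
        omega
      unfold pvShrink lvs
      rw [if_pos hcond, if_neg hok]
      dsimp only
      have ea : (if x = 'a' then cnt 'a' (x :: rest) - 1 else cnt 'a' (x :: rest)) =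
          cnt 'a' rest := by
        by_cases h : x = 'a' <;> simp [h, cnt, List.count_cons, eq_comm]
      have eb : (if x = 'b' then cnt 'b' (x :: rest) - 1 else cnt 'b' (x :: rest)) =
          cnt 'b' rest := by
        by_cases h : x = 'b' <;> simp [h, cnt, List.count_cons, eq_comm]
      have ec : (if x = 'c' then cnt 'c' (x :: rest) - 1 else cnt 'c' (x :: rest)) =
          cnt 'c' rest := by
        by_cases h : x = 'c' <;> simp [h, cnt, List.count_cons, eq_comm]
      rw [ea, eb, ec, ih]

-- fold-min helper lemmas
theorem foldl_min_le_init (g : Nat → Int) (l : List Nat) (a : Int) :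
    l.foldl (fun acc r => min acc (g r)) a ≤ a := by
  induction l generalizing a with
  | nil => simp
  | cons x xs ih => exact le_trans (ih _) (min_le_left _ _)

theorem foldl_min_le_mem (g : Nat → Int) (l : List Nat) (a : Int) {x : Nat}
    (hx : x ∈ l) : l.foldl (fun acc r => min acc (g r)) a ≤ g x := by
  induction l generalizing a with
  | nil => simp at hx
  | cons y ys ih =>
    rcases List.mem_cons.mp hx with h | h
    · subst h; exact le_trans (foldl_min_le_init g ys _) (min_le_right _ _)
    · exact ih _ h

theorem le_foldl_min (g : Nat → Int) (l : List Nat) (a c : Int) (h0 : c ≤ a)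
    (h : ∀ x ∈ l, c ≤ g x) : c ≤ l.foldl (fun acc r => min acc (g r)) a := by
  induction l generalizing a with
  | nil => simpa
  | cons y ys ih =>
    simp only [List.foldl_cons]
    apply ih
    · exact le_min h0 (h y List.mem_cons_self)
    · intro x hx; exact h x (List.mem_cons_of_mem _ hx)

-- foldl max: the result is the seed or a member
theorem foldl_max_mem (l : List Nat) (a : Nat) :
    l.foldl max a = a ∨ l.foldl max a ∈ l := by
  induction l generalizing a with
  | nil => simp
  | cons x xs ih =>
    rcases ih (max a x) with h | h
    · simp only [List.foldl_cons, h]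
      rcases max_choice a x with h' | h' <;> simp [h']
    · simp [List.foldl_cons, h]

theorem init_le_foldl_max (l : List Nat) (a : Nat) : a ≤ l.foldl max a := by
  induction l generalizing a with
  | nil => simp
  | cons z zs ih => exact le_trans (le_max_left _ _) (ih _)

theorem le_foldl_max (l : List Nat) (a : Nat) {x : Nat} (hx : x ∈ l) :
    x ≤ l.foldl max a := by
  induction l generalizing a with
  | nil => simp at hx
  | cons y ys ih =>
    rcases List.mem_cons.mp hx with h | h
    · subst h
      exact le_trans (le_max_right a x) (init_le_foldl_max ys _)
    · exact ih _ h

-- Mx facts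
theorem fR_le_Mx (ka kb kc : Int) (t : List Char) {r : Nat} (hr : r ≤ t.length) :
    fR ka kb kc t r ≤ Mx ka kb kc t := by
  apply le_foldl_max
  exact List.mem_map_of_mem (by simpa using Nat.lt_succ_of_le hr)

theorem Mx_achieved (ka kb kc : Int) (t : List Char) :
    ∃ r ≤ t.length, fR ka kb kc t r = Mx ka kb kc t := by
  rcases foldl_max_mem ((List.range (t.length + 1)).map (fR ka kb kc t)) 0 with h | h
  · refine ⟨0, Nat.zero_le _, ?_⟩
    unfold Mx
    rw [h]
    simp [fR, lvs]
  · rcases List.mem_map.mp h with ⟨r, hr, he⟩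
    exact ⟨r, by simpa using Nat.lt_succ_iff.mp (List.mem_range.mp hr), he⟩

theorem fR_zero (ka kb kc : Int) (t : List Char) : fR ka kb kc t 0 = 0 := by
  simp [fR, lvs]

-- ===== A-side =====

theorem pvCountA_gen (t : List Char) : ∀ a0 b0 c0 : Int,
    t.foldl (fun st i =>
      if i = 'a' then (st.1 + 1, st.2.1, st.2.2)
      else if i = 'b' then (st.1, st.2.1 + 1, st.2.2)
      else if i = 'c' then (st.1, st.2.1, st.2.2 + 1)
      else st) (a0, b0, c0) = (a0 + cnt 'a' t, b0 + cnt 'b' t, c0 + cnt 'c' t) := by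
  induction t with
  | nil => simp [cnt]
  | cons x rest ih =>
    intro a0 b0 c0
    simp only [List.foldl_cons]
    by_cases hxa : x = 'a' <;> by_cases hxb : x = 'b' <;> by_cases hxc : x = 'c' <;>
      simp [hxa, hxb, hxc, ih, cnt, Prod.ext_iff] <;> ring

theorem pvCountA_eq (t : List Char) :
    pvCountA t = (cnt 'a' t, cnt 'b' t, cnt 'c' t) := by
  have := pvCountA_gen t 0 0 0
  simpa [pvCountA] using this

theorem pvLoop_eq {ka kb kc : Int} (ha : 0 ≤ ka) (hb : 0 ≤ kb) (hc : 0 ≤ kc)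
    (t : List Char) :
    ∀ (rem p : List Char) (ans : Int), p ++ rem = t →
      pvLoop ka kb kc (t.length : Int) rem (lvs ka kb kc p)
        (cnt 'a' (lvs ka kb kc p)) (cnt 'b' (lvs ka kb kc p)) (cnt 'c' (lvs ka kb kc p)) ans =
      (List.range' (p.length + 1) rem.length).foldl
        (fun acc r => min acc ((t.length : Int) - (fR ka kb kc t r : Int))) ans := by
  intro rem
  induction rem with
  | nil => intro p ans _; simp [pvLoop]
  | cons x rem ih =>
    intro p ans h
    have ea : (if x = 'a' then cnt 'a' (lvs ka kb kc p) + 1 else cnt 'a' (lvs ka kb kc p)) =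
        cnt 'a' (lvs ka kb kc p ++ [x]) := by
      unfold cnt; rw [List.count_append]; by_cases hx : x = 'a' <;> simp [hx]
    have eb : (if x = 'b' then cnt 'b' (lvs ka kb kc p) + 1 else cnt 'b' (lvs ka kb kc p)) =
        cnt 'b' (lvs ka kb kc p ++ [x]) := by
      unfold cnt; rw [List.count_append]; by_cases hx : x = 'b' <;> simp [hx]
    have ec : (if x = 'c' then cnt 'c' (lvs ka kb kc p) + 1 else cnt 'c' (lvs ka kb kc p)) =
        cnt 'c' (lvs ka kb kc p ++ [x]) := by
      unfold cnt; rw [List.count_append]; by_cases hx : x = 'c' <;> simp [hx]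
    have hp : (p ++ [x]) ++ rem = t := by rw [List.append_assoc]; simpa using h
    have htake : t.take (p.length + 1) = p ++ [x] := by
      have h1 : (p ++ [x]).length = p.length + 1 := by simp
      rw [← hp, ← h1, List.take_left]
    have hfr : fR ka kb kc t (p.length + 1) = (lvs ka kb kc (p ++ [x])).length := by
      unfold fR; rw [htake]
    unfold pvLoop
    dsimp only
    rw [ea, eb, ec, pvShrink_eq ha hb hc, lvs_append_singleton ha hb hc]
    dsimp only
    rw [ih (p ++ [x]) _ hp]
    simp only [List.length_cons, List.length_append, List.length_nil]
    rw [List.range'_succ, List.foldl_cons, hfr]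

theorem A_eq (s : String) (k : Int)
    (hfeas : ¬ (cnt 'a' s.toList < k ∨ cnt 'b' s.toList < k ∨ cnt 'c' s.toList < k)) :
    takeCharacters s k =
      (s.toList.length : Int) -
        (Mx (cnt 'a' s.toList - k) (cnt 'b' s.toList - k) (cnt 'c' s.toList - k) s.toList : Int) := by
  have ha : (0:Int) ≤ cnt 'a' s.toList - k := by push_neg at hfeas; omega
  have hb : (0:Int) ≤ cnt 'b' s.toList - k := by push_neg at hfeas; omega
  have hc : (0:Int) ≤ cnt 'c' s.toList - k := by push_neg at hfeas; omega
  unfold takeCharacters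
  simp only [pvCountA_eq]
  rw [if_neg hfeas]
  have hnil : lvs (cnt 'a' s.toList - k) (cnt 'b' s.toList - k) (cnt 'c' s.toList - k) [] = [] := by
    unfold lvs; split <;> rfl
  have h0 := pvLoop_eq ha hb hc s.toList s.toList [] ((s.toList.length : Nat) : Int) rfl
  rw [hnil] at h0
  simp only [show cnt 'a' ([] : List Char) = 0 from rfl,
    show cnt 'b' ([] : List Char) = 0 from rfl,
    show cnt 'c' ([] : List Char) = 0 from rfl,
    List.length_nil, Nat.zero_add] at h0
  rw [h0]
  -- now: foldl min over r = 1 .. n equals n - Mx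
  set ka := cnt 'a' s.toList - k
  set kb := cnt 'b' s.toList - k
  set kc := cnt 'c' s.toList - k
  set t := s.toList
  set n := t.length with hn
  apply le_antisymm
  · obtain ⟨r0, hr0, hM⟩ := Mx_achieved ka kb kc t
    rcases Nat.eq_zero_or_pos r0 with h0' | h0'
    · have : Mx ka kb kc t = 0 := by rw [← hM, h0', fR_zero]
      rw [this]
      simpa using foldl_min_le_init (fun r => (n : Int) - (fR ka kb kc t r : Int)) _ _
    · have hmem : r0 ∈ List.range' 1 n := List.mem_range'_1.mpr ⟨h0', by omega⟩
      have h2 := foldl_min_le_mem (fun r => (n : Int) - (fR ka kb kc t r : Int)) _ (n : Int) hmem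
      refine le_trans h2 ?_
      show (n : Int) - (fR ka kb kc t r0 : Int) ≤ (n : Int) - (Mx ka kb kc t : Int)
      rw [hM]
  · apply le_foldl_min
    · have : Mx ka kb kc t = fR ka kb kc t ((Mx_achieved ka kb kc t).choose) :=
        (Mx_achieved ka kb kc t).choose_spec.2.symm
      have hle : Mx ka kb kc t ≤ n := by
        rw [this]
        unfold fR
        refine le_trans (lvs_suffix ka kb kc (t.take _)).length_le ?_
        rw [List.length_take]
        omega
      omega
    · intro r hr
      have hr' := List.mem_range'_1.mp hr
      have := fR_le_Mx ka kb kc t (r := r) (by omega)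
      omega

-- ===== B-side =====

theorem pvPref_fold (ch : Char) (t : List Char) :
    t.foldl (fun (st : List Int × Int) c =>
      let run := st.2 + (if c = ch then 1 else 0)
      (st.1 ++ [run], run)) ([0], 0) =
    ((List.range (t.length + 1)).map (fun i => cnt ch (t.take i)), cnt ch t) := by
  induction t using List.reverseRecOn with
  | nil => simp [cnt]
  | append_singleton t x ih =>
    rw [List.foldl_append, ih]
    simp only [List.foldl_cons, List.foldl_nil]
    have hsnd : cnt ch t + (if x = ch then 1 else 0) = cnt ch (t ++ [x]) := by
      unfold cnt
      rw [List.count_append]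
      by_cases h : x = ch <;> simp [h]
    have hlast : (t ++ [x]).take (t.length + 1) = t ++ [x] := by
      have h1 : (t ++ [x]).length = t.length + 1 := by simp
      rw [← h1]; exact List.take_length
    have hlen : (t ++ [x]).length + 1 = (t.length + 1) + 1 := by simp
    have hfst : List.map (fun i => cnt ch ((t ++ [x]).take i)) (List.range ((t ++ [x]).length + 1)) =
        List.map (fun i => cnt ch (t.take i)) (List.range (t.length + 1)) ++
          [cnt ch t + if x = ch then 1 else 0] := by
      rw [hlen, List.range_succ, List.map_append]
      congr 1
      · exact List.map_congr_left (fun i hi => by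
          rw [List.take_append_of_le_length (Nat.lt_succ_iff.mp (List.mem_range.mp hi))])
      · simp only [List.map_cons, List.map_nil, hlast]
        rw [← hsnd]
    exact Prod.ext_iff.mpr ⟨hfst.symm, hsnd⟩

theorem pvPref_getD (ch : Char) (t : List Char) {i : Nat} (h : i ≤ t.length) :
    (pvPref ch t).getD i 0 = cnt ch (t.take i) := by
  unfold pvPref
  rw [pvPref_fold]
  simp [List.getD, List.getElem?_range, Nat.lt_succ_of_le h]

theorem pvBS_spec_aux (ok : Nat → Bool)
    (mono : ∀ i j, i ≤ j → ok i = true → ok j = true) :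
    ∀ (d lo hi : Nat), hi - lo ≤ d → lo ≤ hi → ok hi = true →
      lo ≤ pvBS ok lo hi ∧ pvBS ok lo hi ≤ hi ∧ ok (pvBS ok lo hi) = true ∧
        ∀ j, lo ≤ j → j < pvBS ok lo hi → ok j = false := by
  intro d
  induction d with
  | zero =>
    intro lo hi h1 h2 h3
    have he : lo = hi := by omega
    subst he
    unfold pvBS
    rw [dif_neg (by omega)]
    exact ⟨le_refl _, le_refl _, h3, fun j hj1 hj2 => by omega⟩
  | succ d ih =>
    intro lo hi h1 h2 h3
    by_cases hlt : lo < hi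
    · have hmid1 : lo ≤ (lo + hi) / 2 := by omega
      have hmid2 : (lo + hi) / 2 < hi := by omega
      by_cases hmid : ok ((lo + hi) / 2) = true
      · have heq : pvBS ok lo hi = pvBS ok lo ((lo + hi) / 2) := by
          conv_lhs => rw [pvBS]
          rw [dif_pos hlt]
          simp only []
          rw [if_pos hmid]
        obtain ⟨s1, s2, s3, s4⟩ := ih lo ((lo + hi) / 2) (by omega) hmid1 hmid
        rw [heq]
        exact ⟨s1, by omega, s3, s4⟩
      · have heq : pvBS ok lo hi = pvBS ok ((lo + hi) / 2 + 1) hi := by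
          conv_lhs => rw [pvBS]
          rw [dif_pos hlt]
          simp only []
          rw [if_neg hmid]
        obtain ⟨s1, s2, s3, s4⟩ := ih ((lo + hi) / 2 + 1) hi (by omega) (by omega) h3
        rw [heq]
        refine ⟨by omega, s2, s3, fun j hj1 hj2 => ?_⟩
        by_cases hj3 : (lo + hi) / 2 + 1 ≤ j
        · exact s4 j hj3 hj2
        · by_cases hok : ok j = true
          · exact absurd (mono j ((lo + hi) / 2) (by omega) hok) hmid
          · simpa using hok
    · have he : lo = hi := by omega
      subst he
      unfold pvBS
      rw [dif_neg (by omega)]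
      exact ⟨le_refl _, le_refl _, h3, fun j hj1 hj2 => by omega⟩

theorem pvBS_spec (ok : Nat → Bool)
    (mono : ∀ i j, i ≤ j → ok i = true → ok j = true)
    (lo hi : Nat) (h2 : lo ≤ hi) (h3 : ok hi = true) :
    lo ≤ pvBS ok lo hi ∧ pvBS ok lo hi ≤ hi ∧ ok (pvBS ok lo hi) = true ∧
      ∀ j, lo ≤ j → j < pvBS ok lo hi → ok j = false :=
  pvBS_spec_aux ok mono (hi - lo) lo hi (le_refl _) h2 h3

-- the `ok` test of Source B, as a named function (definitionally equal to the inline lambda)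
def Bok (t : List Char) (k : Int) (i j : Nat) : Bool :=
  decide ((pvPref 'a' t).getD i 0 + cnt 'a' t - (pvPref 'a' t).getD (t.length - j) 0 ≥ k) &&
  decide ((pvPref 'b' t).getD i 0 + cnt 'b' t - (pvPref 'b' t).getD (t.length - j) 0 ≥ k) &&
  decide ((pvPref 'c' t).getD i 0 + cnt 'c' t - (pvPref 'c' t).getD (t.length - j) 0 ≥ k)

theorem B_unfold (s : String) (k : Int)
    (hfeas2 : ¬((List.count 'a' s.toList : Int) < k ∨ (List.count 'b' s.toList : Int) < k ∨
      (List.count 'c' s.toList : Int) < k)) :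
    takeCharacters_alt s k =
      (List.range (s.toList.length + 1)).foldl
        (fun (best : Int) (i : Nat) => min best ((i : Int) +
          (pvBS (Bok s.toList k i) 0 (s.toList.length - i) : Int))) (s.toList.length : Int) := by
  unfold takeCharacters_alt Bok
  simp only []
  rw [if_neg hfeas2]
  rfl

theorem cnt_take_split (ch : Char) (t : List Char) (i m : Nat) (h : i ≤ m) :
    cnt ch (t.take m) = cnt ch (t.take i) + cnt ch ((t.drop i).take (m - i)) := by
  have hsplit : t.take m = t.take i ++ (t.drop i).take (m - i) := by
    rw [← List.take_add]
    congr 1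
    omega
  rw [hsplit]
  unfold cnt
  rw [List.count_append]
  push_cast
  ring

theorem Bok_char (t : List Char) (k : Int) (i j : Nat) (hi : i ≤ t.length)
    (hij : i + j ≤ t.length) :
    Bok t k i j = okW (cnt 'a' t - k) (cnt 'b' t - k) (cnt 'c' t - k)
      ((t.drop i).take (t.length - j - i)) := by
  have hnj : t.length - j ≤ t.length := by omega
  have hinj : i ≤ t.length - j := by omega
  unfold Bok okW
  rw [pvPref_getD 'a' t hi, pvPref_getD 'a' t hnj,
      pvPref_getD 'b' t hi, pvPref_getD 'b' t hnj,
      pvPref_getD 'c' t hi, pvPref_getD 'c' t hnj]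
  have ha := cnt_take_split 'a' t i (t.length - j) hinj
  have hb := cnt_take_split 'b' t i (t.length - j) hinj
  have hc := cnt_take_split 'c' t i (t.length - j) hinj
  congr 1
  · congr 1
    · exact decide_eq_decide.mpr (by omega)
    · exact decide_eq_decide.mpr (by omega)
  · exact decide_eq_decide.mpr (by omega)

theorem Bok_mono (t : List Char) (k : Int) (i : Nat) :
    ∀ j1 j2, j1 ≤ j2 → Bok t k i j1 = true → Bok t k i j2 = true := by
  intro j1 j2 h h1
  have key : ∀ ch, cnt ch (t.take (t.length - j2)) ≤ cnt ch (t.take (t.length - j1)) :=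
    fun ch => cnt_mono ch (List.take_prefix_take_left (by omega)).sublist
  unfold Bok at h1 ⊢
  simp only [Bool.and_eq_true, decide_eq_true_eq] at h1 ⊢
  have h2 : t.length - j2 ≤ t.length := by omega
  have h3 : t.length - j1 ≤ t.length := by omega
  rw [pvPref_getD 'a' t h2, pvPref_getD 'b' t h2, pvPref_getD 'c' t h2]
  rw [pvPref_getD 'a' t h3, pvPref_getD 'b' t h3, pvPref_getD 'c' t h3] at h1
  have ka := key 'a'
  have kb := key 'b'
  have kc := key 'c'
  omega

theorem Bok_top (t : List Char) (k : Int)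
    (ha : 0 ≤ cnt 'a' t - k) (hb : 0 ≤ cnt 'b' t - k) (hc : 0 ≤ cnt 'c' t - k)
    (i : Nat) (hi : i ≤ t.length) : Bok t k i (t.length - i) = true := by
  rw [Bok_char t k i (t.length - i) hi (by omega)]
  have h0 : t.length - (t.length - i) - i = 0 := by omega
  rw [h0, List.take_zero]
  exact okW_nil ha hb hc

theorem Mx_le (ka kb kc : Int) (t : List Char) : Mx ka kb kc t ≤ t.length := by
  obtain ⟨r0, hr0, hM⟩ := Mx_achieved ka kb kc t
  rw [← hM]
  unfold fR
  refine le_trans (lvs_suffix ka kb kc (t.take r0)).length_le ?_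
  rw [List.length_take]
  omega

theorem B_eq (s : String) (k : Int)
    (hfeas : ¬ (cnt 'a' s.toList < k ∨ cnt 'b' s.toList < k ∨ cnt 'c' s.toList < k)) :
    takeCharacters_alt s k =
      (s.toList.length : Int) -
        (Mx (cnt 'a' s.toList - k) (cnt 'b' s.toList - k) (cnt 'c' s.toList - k) s.toList : Int) := by
  have ha : (0:Int) ≤ cnt 'a' s.toList - k := by push_neg at hfeas; omega
  have hb : (0:Int) ≤ cnt 'b' s.toList - k := by push_neg at hfeas; omega
  have hc : (0:Int) ≤ cnt 'c' s.toList - k := by push_neg at hfeas; omega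
  rw [B_unfold s k hfeas]
  set t := s.toList with ht
  set ka := cnt 'a' t - k
  set kb := cnt 'b' t - k
  set kc := cnt 'c' t - k
  set n := t.length with hn
  set M := Mx ka kb kc t with hMdef
  apply le_antisymm
  · -- pick the longest valid window and read off a left/right take achieving n - M
    obtain ⟨r0, hr0, hM⟩ := Mx_achieved ka kb kc t
    have hMr : M ≤ r0 := by
      rw [hMdef, ← hM]
      unfold fR
      refine le_trans (lvs_suffix ka kb kc (t.take r0)).length_le ?_
      rw [List.length_take]
      omega
    have hlenM : (lvs ka kb kc (t.take r0)).length = M := hM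
    have hw : (t.drop (r0 - M)).take (n - (n - r0) - (r0 - M)) = lvs ka kb kc (t.take r0) := by
      have h1 : n - (n - r0) - (r0 - M) = r0 - (r0 - M) := by omega
      rw [h1, ← List.drop_take]
      have hs2 : (t.take r0).drop (r0 - M) <:+ t.take r0 := List.drop_suffix _ _
      have hs1 : lvs ka kb kc (t.take r0) <:+ t.take r0 := lvs_suffix _ _ _ _
      have hlen2 : ((t.take r0).drop (r0 - M)).length = M := by
        rw [List.length_drop, List.length_take]
        omega
      exact ((suffix_of_suffix_length_le hs2 hs1 (by omega)).eq_of_length (by omega))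
    have hok : Bok t k (r0 - M) (n - r0) = true := by
      rw [Bok_char t k (r0 - M) (n - r0) (by omega) (by omega), hw]
      exact lvs_ok ha hb hc _
    obtain ⟨s1, s2, s3, s4⟩ := pvBS_spec (Bok t k (r0 - M)) (Bok_mono t k (r0 - M))
      0 (n - (r0 - M)) (Nat.zero_le _) (Bok_top t k ha hb hc (r0 - M) (by omega))
    have hjm : pvBS (Bok t k (r0 - M)) 0 (n - (r0 - M)) ≤ n - r0 := by
      by_contra hcon
      have := s4 (n - r0) (Nat.zero_le _) (by omega)
      rw [hok] at this
      exact absurd this (by simp)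
    have hmem : r0 - M ∈ List.range (n + 1) := List.mem_range.mpr (by omega)
    refine le_trans (foldl_min_le_mem
      (fun i => (i : Int) + (pvBS (Bok t k i) 0 (n - i) : Int)) _ (n : Int) hmem) ?_
    have hcast : ((r0 - M : Nat) : Int) = (r0 : Int) - (M : Int) := by omega
    have hjm' : ((pvBS (Bok t k (r0 - M)) 0 (n - (r0 - M)) : Nat) : Int) ≤ ((n - r0 : Nat) : Int) := by
      exact_mod_cast hjm
    have hnr : ((n - r0 : Nat) : Int) = (n : Int) - (r0 : Int) := by omega
    simp only []
    omega
  · apply le_foldl_min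
    · have := Mx_le ka kb kc t
      omega
    · intro i hi
      have hi' : i ≤ n := by
        have := List.mem_range.mp hi
        omega
      obtain ⟨s1, s2, s3, s4⟩ := pvBS_spec (Bok t k i) (Bok_mono t k i)
        0 (n - i) (Nat.zero_le _) (Bok_top t k ha hb hc i hi')
      set j := pvBS (Bok t k i) 0 (n - i) with hj
      have hokw : okW ka kb kc ((t.drop i).take (n - j - i)) = true := by
        rw [← Bok_char t k i j hi' (by omega)]
        exact s3
      have hsfx : (t.drop i).take (n - j - i) <:+ t.take (n - j) := by
        rw [← List.drop_take]
        exact List.drop_suffix _ _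
      have hlw : ((t.drop i).take (n - j - i)).length = n - j - i := by
        rw [List.length_take, List.length_drop]
        omega
      have hfRle : n - j - i ≤ M := by
        have h1 := lvs_longest (t.take (n - j)) _ hsfx hokw
        rw [hlw] at h1
        have h2 : fR ka kb kc t (n - j) ≤ M := fR_le_Mx ka kb kc t (by omega)
        unfold fR at h2
        omega
      have hcast : ((n : Nat) : Int) - (M : Int) ≤ (i : Int) + (j : Int) := by
        have : n - j - i ≤ M := hfRle
        omega
      exact hcast

-- ===== VERDICT (by name: the statement is the Claim_ definition above) =====
theorem takeCharacters_spec : Claim_equal_takeCharacters := by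
  intro s k _
  unfold Spec_takeCharacters
  by_cases hfeas : cnt 'a' s.toList < k ∨ cnt 'b' s.toList < k ∨ cnt 'c' s.toList < k
  · -- both return -1
    show takeCharacters s k = takeCharacters_alt s k
    have hfeas2 : ((List.count 'a' s.toList : Int) < k ∨ (List.count 'b' s.toList : Int) < k ∨
        (List.count 'c' s.toList : Int) < k) := hfeas
    unfold takeCharacters takeCharacters_alt
    simp only [pvCountA_eq]
    rw [if_pos hfeas, if_pos hfeas2]
  · rw [A_eq s k hfeas, B_eq s k hfeas]
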